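-- pv_equiv track=rewrite | github.com/hondotanuki/competition-archive | kaggle/2024-santa/algorithm/beamsearch.py | _make_candidates_adding_word
-- ===== SOURCE A (Python) =====
-- def _make_candidates_adding_word(current_text, words):
--     """Make candidate text so that word duplication does not occur"""
--     candidates = []
--     not_used_words = words.copy()
--     for used_word in current_text.split():
--         not_used_words.remove(used_word)
--
--     candidates += [(current_text + " " + word).lstrip() for word in not_used_words]
--     candidates += [(word + " " + current_text).rstrip() for word in not_used_words]
--
--     return candidates
-- ===== SOURCE B (Python) =====
-- def _make_candidates_adding_word(current_text, words):
--     """Make candidate text so that word duplication does not occur"""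
--     quota = {}
--     for w in current_text.split():
--         quota[w] = quota.get(w, 0) + 1
--     not_used_words = []
--     for w in words:
--         if quota.get(w, 0) > 0:
--             quota[w] = quota[w] - 1
--         else:
--             not_used_words.append(w)
--     return [(current_text + " " + w).lstrip() for w in not_used_words] + \
--            [(w + " " + current_text).rstrip() for w in not_used_words]
-- ===== Notes on version B (the rewrite author's own statement) =====
-- stated objective: faster
-- what changed: Replaces the repeated destructive list.remove scans with a word-count dictionary built once from current_text.split(), then a single pass over words that skips each word while its counted quota is positive.
import Mathlib
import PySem

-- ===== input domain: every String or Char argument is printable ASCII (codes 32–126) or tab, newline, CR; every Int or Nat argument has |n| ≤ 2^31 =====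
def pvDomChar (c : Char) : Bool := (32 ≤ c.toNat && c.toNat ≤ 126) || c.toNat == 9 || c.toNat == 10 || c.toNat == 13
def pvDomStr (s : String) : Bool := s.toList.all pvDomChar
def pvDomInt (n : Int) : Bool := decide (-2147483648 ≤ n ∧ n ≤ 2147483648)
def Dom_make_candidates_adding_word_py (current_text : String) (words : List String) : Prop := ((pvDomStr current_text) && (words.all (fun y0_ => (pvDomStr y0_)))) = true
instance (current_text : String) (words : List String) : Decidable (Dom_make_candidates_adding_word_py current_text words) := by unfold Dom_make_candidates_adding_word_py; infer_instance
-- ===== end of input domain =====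

-- B replaces A's per-used-word list.remove scans by a quota dictionary and one pass over words (faster); return value only, A does not mutate its arguments.

-- ===== PORT A =====
-- 'for used_word in current_text.split(): not_used_words.remove(used_word)'; remove? = none is Python's ValueError (excluded by Pre_, the port returns [] there).
def make_candidates_adding_word_py (current_text : String) (words : List String) : List String :=
  let not_used? := (PySem.Str.split₀ current_text).foldl
      (fun acc w => acc.bind (fun l => PySem.List.remove? l w)) (some words)
  match not_used? with
  | none => []
  | some not_used_words =>
      ([] ++ not_used_words.map (fun word => PySem.Str.lstrip (current_text ++ " " ++ word)))
        ++ not_used_words.map (fun word => PySem.Str.rstrip (word ++ " " ++ current_text))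

-- ===== PORT B =====
-- one step of Source B's quota loop: skip w while its quota is positive (decrement), else keep it
def pvQuotaStep (p : PySem.Dict String Int × List String) (w : String) : PySem.Dict String Int × List String :=
  if p.1.getD w 0 > 0 then (p.1.insert w (p.1.getD w 0 - 1), p.2) else (p.1, p.2 ++ [w])

def make_candidates_adding_word_py_alt (current_text : String) (words : List String) : List String :=
  let quota := (PySem.Str.split₀ current_text).foldl
      (fun d w => d.insert w (d.getD w 0 + 1)) PySem.Dict.empty
  let not_used_words := (words.foldl pvQuotaStep (quota, [])).2
  not_used_words.map (fun w => PySem.Str.lstrip (current_text ++ " " ++ w))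
    ++ not_used_words.map (fun w => PySem.Str.rstrip (w ++ " " ++ current_text))

-- ===== PRECONDITION & SPEC =====
-- Pre_ excludes exactly the inputs on which A raises ValueError: some used word occurs more often in current_text.split() than in words.
def Pre_make_candidates_adding_word_py (current_text : String) (words : List String) : Prop :=
  ∀ w ∈ PySem.Str.split₀ current_text,
    (PySem.Str.split₀ current_text).count w ≤ words.count w
instance (current_text : String) (words : List String) : Decidable (Pre_make_candidates_adding_word_py current_text words) := by unfold Pre_make_candidates_adding_word_py; infer_instance

def pvWitness_make_candidates_adding_word_py : String × List String := ("a b", ["a", "b", "c"])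

def Spec_make_candidates_adding_word_py (current_text : String) (words : List String) (out : List String) : Prop := out = make_candidates_adding_word_py_alt current_text words
instance (current_text : String) (words : List String) (out : List String) : Decidable (Spec_make_candidates_adding_word_py current_text words out) := by unfold Spec_make_candidates_adding_word_py; infer_instance

-- ===== CLAIM (what is proved, stated in full; the proofs are below) =====
def Claim_equal_make_candidates_adding_word_py : Prop := ∀ (current_text : String) (words : List String), Dom_make_candidates_adding_word_py current_text words → Pre_make_candidates_adding_word_py current_text words → Spec_make_candidates_adding_word_py current_text words (make_candidates_adding_word_py current_text words)


-- ===== LEMMAS AND PROOFS =====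

-- proof-side model of both loops: remove, from each word, as many leading occurrences as its quota
def dropQ (c : String → Nat) : List String → List String
  | [] => []
  | w :: ws => if c w > 0 then dropQ (fun x => if x = w then c x - 1 else c x) ws else w :: dropQ c ws

theorem dropQ_bump (u : String) (ws : List String) :
    ∀ c : String → Nat, u ∈ ws →
      dropQ (fun x => if x = u then c x + 1 else c x) ws = dropQ c (ws.erase u) := by
  induction ws with
  | nil => intro c h; simp at h
  | cons w ws ih =>
    intro c h
    by_cases hw : w = u
    · subst hw
      simp [dropQ, List.erase_cons_head]
      congr 1
      funext x
      by_cases hx : x = w <;> simp [hx]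
    · have hu : u ∈ ws := by
        rcases List.mem_cons.mp h with h1 | h1
        · exact absurd h1.symm hw
        · exact h1
      rw [List.erase_cons_tail (by simp [hw])]
      by_cases hc : c w > 0
      · simp only [dropQ, if_neg (by simp [hw] : ¬ w = u), if_pos hc]
        rw [show (fun x => if x = w then (if x = u then c x + 1 else c x) - 1 else (if x = u then c x + 1 else c x))
            = (fun x => if x = u then (fun y => if y = w then c y - 1 else c y) x + 1 else (fun y => if y = w then c y - 1 else c y) x) from by
          funext x
          by_cases hx : x = w <;> by_cases hxu : x = u <;> simp [hx, hxu, hw, show ¬ u = w from fun h => hw h.symm]]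
        exact ih _ hu
      · simp only [dropQ, if_neg (by simp [hw] : ¬ w = u), if_neg hc]
        rw [ih c hu]

theorem dropQ_zero (ws : List String) : dropQ (fun _ => 0) ws = ws := by
  induction ws with
  | nil => rfl
  | cons w ws ih => simp [dropQ, ih]

theorem foldl_remove_eq (used : List String) :
    ∀ ws : List String, (∀ w, used.count w ≤ ws.count w) →
      used.foldl (fun acc w => acc.bind (fun l => PySem.List.remove? l w)) (some ws)
        = some (dropQ (fun x => used.count x) ws) := by
  induction used with
  | nil => intro ws _; simp [dropQ_zero]
  | cons u us ih =>
    intro ws h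
    have hu : u ∈ ws := by
      have := h u
      simp [List.count_cons_self] at this
      exact List.count_pos_iff.mp (by omega)
    simp only [List.foldl_cons, Option.bind_some]
    rw [PySem.List.remove?_eq_some_erase ws u hu]
    rw [ih (ws.erase u) (fun w => by
      have hcw := h w
      rw [List.count_erase]
      by_cases hwu : w = u <;> simp [hwu, List.count_cons] at hcw ⊢ <;> omega)]
    congr 1
    rw [← dropQ_bump u ws (fun x => us.count x) hu]
    congr 1
    funext x
    by_cases hx : x = u
    · simp [hx]
    · simp [hx, show ¬ u = x from fun hh => hx hh.symm]

theorem foldl_quota_eq (ws : List String) :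
    ∀ (d : PySem.Dict String Int) (acc : List String), (∀ x, 0 ≤ d.getD x 0) →
      (ws.foldl pvQuotaStep (d, acc)).2 = acc ++ dropQ (fun x => (d.getD x 0).toNat) ws := by
  induction ws with
  | nil => intro d acc _; simp [dropQ]
  | cons w ws ih =>
    intro d acc hnn
    by_cases hc : d.getD w 0 > 0
    · simp only [List.foldl_cons, pvQuotaStep, if_pos hc, dropQ]
      rw [if_pos (by omega : (d.getD w 0).toNat > 0)]
      rw [ih _ acc (fun x => by
        have h1 := hnn x
        rw [PySem.Dict.getD_insert]
        by_cases hx : x = w <;> simp [hx] <;> omega)]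
      congr 2
      funext x
      have h1 := hnn x
      rw [PySem.Dict.getD_insert]
      by_cases hx : x = w <;> simp [hx]
    · simp only [List.foldl_cons, pvQuotaStep, if_neg hc, dropQ]
      rw [if_neg (by omega : ¬ (d.getD w 0).toNat > 0)]
      rw [ih d (acc ++ [w]) hnn, List.append_assoc]
      rfl

-- ===== VERDICT (by name: the statement is the Claim_ definition above) =====
theorem make_candidates_adding_word_py_spec : Claim_equal_make_candidates_adding_word_py := by
  intro t ws _ hpre
  show _ = _
  have hall : ∀ w, (PySem.Str.split₀ t).count w ≤ ws.count w := by
    intro w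
    by_cases hw : w ∈ PySem.Str.split₀ t
    · exact hpre w hw
    · simp [List.count_eq_zero_of_not_mem hw]
  simp only [make_candidates_adding_word_py, make_candidates_adding_word_py_alt]
  rw [foldl_remove_eq (PySem.Str.split₀ t) ws hall]
  rw [PySem.Dict.foldl_insert_getD_add_one_eq_counter]
  rw [foldl_quota_eq ws (PySem.Dict.counter (PySem.Str.split₀ t)) []
      (fun x => by rw [PySem.Dict.getD_counter]; positivity)]
  simp only [List.nil_append]
  have hc : (fun x => ((PySem.Dict.counter (PySem.Str.split₀ t)).getD x 0).toNat)
      = (fun x => (PySem.Str.split₀ t).count x) := by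
    funext x
    rw [PySem.Dict.getD_counter]
    simp
  rw [hc]
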